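-- pv_equiv track=rewrite | github.com/mushcatshiro/mahjong | fan.py | san_se_san_jie_gao
-- ===== SOURCE A (Python) =====
-- def san_se_san_jie_gao(merged_suites: dict):
--     # 三色三节高 三种花色依次递增1的三副刻子
--     if len(merged_suites) != 3:
--         return False
--     candits = {}
--     for suite, tiles in merged_suites.items():
--         bptr = 0
--         fptr = 2
--         while fptr < len(tiles):
--             tmp = tiles[bptr : fptr + 1]
--             if tmp[0] == tmp[1] and tmp[0] == tmp[2]:
--                 if suite not in candits:
--                     candits[suite] = [tmp[0]]
--                 else:
--                     if tmp[0] not in candits[suite]: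
--                         candits[suite].append(tmp[0])
--                 bptr += 3
--                 fptr += 3
--             else:
--                 bptr += 1
--                 fptr += 1
--     if len(candits) != 3:
--         return False
--     vals = []
--     for candit in candits.values():
--         vals += candit
--     vals = "".join(sorted(vals))
--     for i in range(0, len(vals) - 1):
--         if i + 2 > len(vals) - 1:
--             break
--         if int(vals[i]) + 1 == int(vals[i + 1]) and int(vals[i + 1]) + 1 == int(
--             vals[i + 2]
--         ):
--             return True
--     return False
-- ===== SOURCE B (Python) =====
-- def san_se_san_jie_gao(merged_suites: dict):
--     # run-length grouping over each suite instead of A's sliding-window pointer loop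
--     if len(merged_suites) != 3:
--         return False
--     candits = {}
--     for suite, tiles in merged_suites.items():
--         found = _run_values(tiles)
--         if found:
--             candits[suite] = found
--     if len(candits) != 3:
--         return False
--     vals = []
--     for candit in candits.values():
--         vals += candit
--     s = "".join(sorted(vals))
--     return any(int(a) + 1 == int(b) and int(b) + 1 == int(c)
--                for a, b, c in zip(s, s[1:], s[2:]))
--
--
-- def _run_values(tiles):
--     # values of maximal runs of >= 3 adjacent equal tiles, deduped, in order
--     found = []
--     rest = tiles
--     while rest:
--         v = rest[0]
--         n = 1 + _pref_len(v, rest[1:])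
--         if n >= 3 and v not in found:
--             found.append(v)
--         rest = rest[n:]
--     return found
--
--
-- def _pref_len(v, xs):
--     k = 0
--     for x in xs:
--         if x != v:
--             break
--         k += 1
--     return k
-- ===== Notes on version B (the rewrite author's own statement) =====
-- stated objective: simpler
-- what changed: Per-suite triplet detection uses run-length grouping of adjacent equal tiles instead of A's bptr/fptr sliding-window with jump-by-3 pointer arithmetic, and the final consecutive-digits test is an any() over zip(s, s[1:], s[2:]) instead of an index loop with a manual break; B raises ValueError exactly where A does, and Pre_ excludes only association lists with duplicate suite keys (not representable as a Python dict) plus exactly the inputs on which A's int() raises ValueError.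
import Mathlib
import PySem

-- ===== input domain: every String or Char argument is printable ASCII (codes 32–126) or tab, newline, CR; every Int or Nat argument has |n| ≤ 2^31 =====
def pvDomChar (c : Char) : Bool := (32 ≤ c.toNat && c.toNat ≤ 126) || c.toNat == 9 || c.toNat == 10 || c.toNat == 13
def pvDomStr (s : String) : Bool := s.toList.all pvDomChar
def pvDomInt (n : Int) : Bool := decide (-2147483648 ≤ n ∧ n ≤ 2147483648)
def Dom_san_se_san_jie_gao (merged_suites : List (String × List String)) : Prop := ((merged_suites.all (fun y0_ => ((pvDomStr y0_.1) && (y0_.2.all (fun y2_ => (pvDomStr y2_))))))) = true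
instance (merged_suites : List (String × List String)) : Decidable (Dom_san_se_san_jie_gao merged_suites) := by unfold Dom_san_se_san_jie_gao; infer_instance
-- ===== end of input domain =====

-- B replaces A's sliding-window pointer loop by run-length grouping and the final
-- index loop by an any-over-zipped-triples scan (objective: simpler/alternative).

-- int(c) for a single character c; outside Pre_'s no-raise region the default 0 is never
-- consulted in a way that changes the result (a non-digit position is only reached where
-- Python raises, or inside a conjunction already false)
def pvDigit (c : Char) : Int := (PySem.Int.ofStr? (String.mk [c])).getD 0

-- ===== PORT A =====
-- the while-loop over bptr/fptr for one suite; `found` is candits[suite] ([] = key absent)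
def sssjgAFound (tiles : List String) (b f : Int) (found : List String) : List String :=
  if _h : f < (tiles.length : Int) then
    let tmp := PySem.List.slice tiles (some b) (some (f + 1))
    -- tmp always has 3 elements when fptr < len (bptr = fptr-2 ≥ 0), so getD "" is never used
    let t0 := (PySem.List.pyGet? tmp 0).getD ""
    let t1 := (PySem.List.pyGet? tmp 1).getD ""
    let t2 := (PySem.List.pyGet? tmp 2).getD ""
    if t0 == t1 && t0 == t2 then
      sssjgAFound tiles (b + 3) (f + 3) (if found.contains t0 then found else found ++ [t0])
    else
      sssjgAFound tiles (b + 1) (f + 1) found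
  else found
termination_by ((tiles.length : Int) - f).toNat
decreasing_by all_goals (simp at _h ⊢; omega)

-- the final `for i in range(0, len(vals)-1)` loop with its break
def sssjgAScan (cs : List Char) (i : Int) : Bool :=
  if _h : i < (cs.length : Int) - 1 then
    if i + 2 > (cs.length : Int) - 1 then false
    else if pvDigit ((PySem.List.pyGet? cs i).getD ' ') + 1 == pvDigit ((PySem.List.pyGet? cs (i + 1)).getD ' ')
            && pvDigit ((PySem.List.pyGet? cs (i + 1)).getD ' ') + 1 == pvDigit ((PySem.List.pyGet? cs (i + 2)).getD ' ') then
      true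
    else sssjgAScan cs (i + 1)
  else false
termination_by ((cs.length : Int) - i).toNat
decreasing_by simp at _h ⊢; omega

-- candits is keyed by the (distinct, per Pre_) suite names in processing order, so it is
-- the in-order list of (suite, found) pairs with found ≠ []
def san_se_san_jie_gao (merged_suites : List (String × List String)) : Bool :=
  if merged_suites.length ≠ 3 then false
  else
    let candits := (merged_suites.map (fun p => (p.1, sssjgAFound p.2 0 2 []))).filter (fun p => !p.2.isEmpty)
    if candits.length ≠ 3 then false
    else
      let vals := candits.foldl (fun acc p => acc ++ p.2) []
      let s := PySem.Str.join "" (PySem.List.sorted vals (fun x => x) false)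
      sssjgAScan s.toList 0

-- ===== PORT B =====
-- _pref_len: count of leading elements of xs equal to v
def pvPrefLen (v : String) : List String → Nat
  | [] => 0
  | x :: xs => if x == v then pvPrefLen v xs + 1 else 0

-- _run_values: rest[0] = v, run length n, rest = rest[n:]  (on v :: r, rest[n:] = r.drop (n-1))
def sssjgBFound : List String → List String → List String
  | [], found => found
  | v :: r, found =>
    let n := 1 + pvPrefLen v r
    sssjgBFound (r.drop (n - 1)) (if 3 ≤ n && !found.contains v then found ++ [v] else found)
termination_by l _ => l.length
decreasing_by simp

-- any(... for a, b, c in zip(s, s[1:], s[2:]))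
def sssjgBScan (cs : List Char) : Bool :=
  (cs.zip ((cs.drop 1).zip (cs.drop 2))).any
    (fun t => pvDigit t.1 + 1 == pvDigit t.2.1 && pvDigit t.2.1 + 1 == pvDigit t.2.2)

def san_se_san_jie_gao_alt (merged_suites : List (String × List String)) : Bool :=
  if merged_suites.length ≠ 3 then false
  else
    let candits := (merged_suites.map (fun p => (p.1, sssjgBFound p.2 []))).filter (fun p => !p.2.isEmpty)
    if candits.length ≠ 3 then false
    else
      let vals := candits.foldl (fun acc p => acc ++ p.2) []
      let s := PySem.Str.join "" (PySem.List.sorted vals (fun x => x) false)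
      sssjgBScan s.toList

-- ===== PRECONDITION & SPEC =====
-- helpers for Pre_ (input characterization only; they do not use either port):
-- value v occurs as three adjacent equal tiles somewhere in tiles (= exactly the set of
-- values A's window loop records for that suite, each once)
def pvHasTriple (tiles : List String) (v : String) : Bool :=
  (tiles.zip ((tiles.drop 1).zip (tiles.drop 2))).any
    (fun t => t.1 == v && t.2.1 == v && t.2.2 == v)

def pvSuiteVals (tiles : List String) : List String :=
  tiles.dedup.filter (pvHasTriple tiles)

-- exact characterization of "A's final loop never calls int() on a non-digit character":
-- on the joined sorted candidate string, the FIRST index carrying an event is either a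
-- raise event (a non-digit at a position the loop evaluates) or a true event (an
-- incrementing digit triple); A returns normally iff there is no event or the first
-- event is a true event
-- lexicographic (code-point) order on strings, and an insertion sort with it:
-- same ordering Python's sorted() uses on str (kernel-reducible, for `decide`)
def pvLexLe : List Char → List Char → Bool
  | [], _ => true
  | _ :: _, [] => false
  | a :: as, b :: bs => if a = b then pvLexLe as bs else Nat.blt a.toNat b.toNat

def pvInsertStr (x : String) : List String → List String
  | [] => [x]
  | y :: ys => if pvLexLe x.toList y.toList then x :: y :: ys else y :: pvInsertStr x ys

def pvSortStrs (l : List String) : List String := l.foldr pvInsertStr []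

def pvNoRaise (ms : List (String × List String)) : Bool :=
  if ms.length ≠ 3 then true
  else
    let lists := ms.map (fun p => pvSuiteVals p.2)
    if lists.any (fun l => l.isEmpty) then true
    else
      let cs := (pvSortStrs lists.flatten).flatMap (fun s => s.toList)
      let dig := fun (i : Nat) => PySem.Chars.isdigit ((cs[i]?).getD ' ')
      let v := fun (i : Nat) => ((cs[i]?).getD ' ').toNat
      let raiseEvt := fun (i : Nat) =>
        !dig i || !dig (i + 1) || ((v i + 1 == v (i + 1)) && !dig (i + 2))
      let trueEvt := fun (i : Nat) =>
        dig i && dig (i + 1) && dig (i + 2) && (v i + 1 == v (i + 1)) && (v (i + 1) + 1 == v (i + 2))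
      match (List.range (cs.length - 2)).find? (fun i => raiseEvt i || trueEvt i) with
      | none => true
      | some i => trueEvt i

-- Pre_ excludes (a) association lists with duplicate suite keys, which cannot arise from a
-- Python dict argument, and (b) exactly the inputs on which A's int() raises ValueError
-- (a non-digit character is evaluated in the final loop before any incrementing digit
-- triple is found); on every input where A returns a value, Pre_ holds.
def Pre_san_se_san_jie_gao (merged_suites : List (String × List String)) : Prop :=
  (merged_suites.map Prod.fst).Nodup ∧ pvNoRaise merged_suites = true
instance (merged_suites : List (String × List String)) : Decidable (Pre_san_se_san_jie_gao merged_suites) := by unfold Pre_san_se_san_jie_gao; infer_instance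

def pvWitness_san_se_san_jie_gao : (List (String × List String)) :=
  [("W", ["1", "1", "1"]), ("B", ["2", "2", "2"]), ("T", ["3", "3", "3"])]

def Spec_san_se_san_jie_gao (merged_suites : List (String × List String)) (out : Bool) : Prop := out = san_se_san_jie_gao_alt merged_suites
instance (merged_suites : List (String × List String)) (out : Bool) : Decidable (Spec_san_se_san_jie_gao merged_suites out) := by unfold Spec_san_se_san_jie_gao; infer_instance

-- ===== CLAIM (what is proved, stated in full; the proofs are below) =====
def Claim_equal_san_se_san_jie_gao : Prop := ∀ (merged_suites : List (String × List String)), Dom_san_se_san_jie_gao merged_suites → Pre_san_se_san_jie_gao merged_suites → Spec_san_se_san_jie_gao merged_suites (san_se_san_jie_gao merged_suites)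

-- ===== LEMMAS AND PROOFS =====

-- structural form of A's per-suite window loop
def pvAStruct : List String → List String → List String
  | a :: b :: c :: r, found =>
    if a == b && a == c then pvAStruct r (if found.contains a then found else found ++ [a])
    else pvAStruct (b :: c :: r) found
  | _, found => found

lemma pvAStruct_short (l : List String) (found : List String) (h : l.length < 3) :
    pvAStruct l found = found := by
  match l with
  | [] => rfl
  | [_] => rfl
  | [_, _] => rfl
  | _ :: _ :: _ :: _ => simp at h; omega

lemma pvGet3_0 (a b c : String) : (PySem.List.pyGet? [a, b, c] 0).getD "" = a := by
  rw [show (0:Int) = ((0:Nat):Int) by norm_num, PySem.List.pyGet?_natCast]; simp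

lemma pvGet3_1 (a b c : String) : (PySem.List.pyGet? [a, b, c] 1).getD "" = b := by
  rw [show (1:Int) = ((1:Nat):Int) by norm_num, PySem.List.pyGet?_natCast]; simp

lemma pvGet3_2 (a b c : String) : (PySem.List.pyGet? [a, b, c] 2).getD "" = c := by
  rw [show (2:Int) = ((2:Nat):Int) by norm_num, PySem.List.pyGet?_natCast]; simp

lemma sssjgAFound_eq_struct (tiles : List String) (k : Nat) (found : List String) :
    sssjgAFound tiles (k : Int) ((k : Int) + 2) found = pvAStruct (tiles.drop k) found := by
  have H : ∀ (m k : Nat) (found : List String), tiles.length - k ≤ m →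
      sssjgAFound tiles (k : Int) ((k : Int) + 2) found = pvAStruct (tiles.drop k) found := by
    intro m
    induction m with
    | zero =>
      intro k found hm
      rw [sssjgAFound, dif_neg (by omega)]
      rw [pvAStruct_short _ _ (by simp; omega)]
    | succ m ih =>
      intro k found hm
      by_cases h : k + 2 < tiles.length
      · have hlen : 3 ≤ (tiles.drop k).length := by simp; omega
        obtain ⟨a, t1, hd1⟩ : ∃ a t1, tiles.drop k = a :: t1 := by
          cases hdk : tiles.drop k with
          | nil => simp [hdk] at hlen
          | cons a t1 => exact ⟨a, t1, rfl⟩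
        obtain ⟨b, t2, hd2⟩ : ∃ b t2, t1 = b :: t2 := by
          cases t1 with
          | nil => rw [hd1] at hlen; simp at hlen
          | cons b t2 => exact ⟨b, t2, rfl⟩
        obtain ⟨c, t3, hd3⟩ : ∃ c t3, t2 = c :: t3 := by
          cases t2 with
          | nil => rw [hd1, hd2] at hlen; simp at hlen
          | cons c t3 => exact ⟨c, t3, rfl⟩
        subst hd2; subst hd3
        have hslice : PySem.List.slice tiles (some (k : Int)) (some ((k : Int) + 2 + 1)) = [a, b, c] := by
          have he : ((k : Int) + 2 + 1) = ((k : Int) + ((3 : Nat) : Int)) := by push_cast; ring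
          rw [he, PySem.List.slice_natCast_add, hd1]
          rfl
        have hdrop1 : tiles.drop (k + 1) = b :: c :: t3 := by
          rw [← List.tail_drop, hd1]; rfl
        have hdrop3 : tiles.drop (k + 3) = t3 := by
          rw [show k + 3 = (k + 2) + 1 from rfl, ← List.tail_drop,
              show k + 2 = (k + 1) + 1 from rfl, ← List.tail_drop, hdrop1]; rfl
        rw [sssjgAFound, dif_pos (by push_cast; omega)]
        simp only [hslice, pvGet3_0, pvGet3_1, pvGet3_2]
        rw [hd1]
        by_cases hcond : (a == b && a == c) = true
        · simp only [hcond, if_true, pvAStruct]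
          have e1 : (k : Int) + 3 = ((k + 3 : Nat) : Int) := by push_cast; ring
          have e2 : (k : Int) + 2 + 3 = ((k + 3 : Nat) : Int) + 2 := by push_cast; ring
          rw [e1, e2, ih (k + 3) _ (by omega), hdrop3]
        · simp only [hcond, if_false, Bool.false_eq_true]
          have hpv : pvAStruct (a :: b :: c :: t3) found = pvAStruct (b :: c :: t3) found := by
            simp [pvAStruct, hcond]
          rw [hpv]
          have e1 : (k : Int) + 1 = ((k + 1 : Nat) : Int) := by push_cast; ring
          have e2 : (k : Int) + 2 + 1 = ((k + 1 : Nat) : Int) + 2 := by push_cast; ring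
          rw [e1, e2, ih (k + 1) _ (by omega), hdrop1]
      · rw [sssjgAFound, dif_neg (by push_cast; omega)]
        rw [pvAStruct_short _ _ (by simp; omega)]
  exact H tiles.length k found (by omega)

lemma pvPrefLen_le (v : String) (r : List String) : pvPrefLen v r ≤ r.length := by
  induction r with
  | nil => simp [pvPrefLen]
  | cons x xs ih => simp only [pvPrefLen]; split <;> simp <;> omega

lemma pvPrefLen_take (v : String) (r : List String) :
    r.take (pvPrefLen v r) = List.replicate (pvPrefLen v r) v := by
  induction r with
  | nil => simp [pvPrefLen]
  | cons x xs ih =>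
    simp only [pvPrefLen]
    split
    · next h => simp_all [List.replicate_succ]
    · simp

lemma pvPrefLen_head (v : String) (r : List String) (x : String)
    (h : r[pvPrefLen v r]? = some x) : x ≠ v := by
  induction r with
  | nil => simp at h
  | cons y xs ih =>
    simp only [pvPrefLen] at h
    by_cases hy : y == v
    · simp [hy] at h; exact ih h
    · simp [hy] at h
      rintro rfl; simp_all

-- A's window loop skips through a run of v: if the run has length ≥ 3 it records v once,
-- then walks the rest of the run without recording (v is already in found)
lemma pvAStruct_run_one (v : String) (rest found : List String)
    (hhd : ∀ x, rest.head? = some x → x ≠ v) :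
    pvAStruct (v :: rest) found = pvAStruct rest found := by
  match rest with
  | [] => rfl
  | [h1] => rfl
  | h1 :: h2 :: t =>
    have h1v : h1 ≠ v := hhd h1 rfl
    have : (v == h1) = false := by simp [Ne.symm h1v]
    simp [pvAStruct, this]

lemma pvAStruct_run_two (v : String) (rest found : List String)
    (hhd : ∀ x, rest.head? = some x → x ≠ v) :
    pvAStruct (v :: v :: rest) found = pvAStruct rest found := by
  match rest with
  | [] => rfl
  | h1 :: t =>
    have h1v : h1 ≠ v := hhd h1 rfl
    have hc : (v == h1) = false := by simp [Ne.symm h1v]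
    have : pvAStruct (v :: v :: h1 :: t) found = pvAStruct (v :: h1 :: t) found := by
      simp [pvAStruct, hc]
    rw [this, pvAStruct_run_one v (h1 :: t) found (by intro x hx; simp at hx; exact hx ▸ h1v)]

lemma pvAStruct_run_mem (n : Nat) (v : String) (rest found : List String)
    (hmem : found.contains v) (hhd : ∀ x, rest.head? = some x → x ≠ v) :
    pvAStruct (List.replicate n v ++ rest) found = pvAStruct rest found := by
  induction n using Nat.strong_induction_on generalizing found with
  | _ n ih =>
    match n with
    | 0 => simp
    | 1 => simpa using pvAStruct_run_one v rest found hhd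
    | 2 => simpa [List.replicate_succ] using pvAStruct_run_two v rest found hhd
    | (m+3) =>
      have hstep : pvAStruct (List.replicate (m+3) v ++ rest) found
          = pvAStruct (List.replicate m v ++ rest) found := by
        have hm : v ∈ found := by simpa using hmem
        simp [List.replicate_succ, pvAStruct, hm]
      rw [hstep]; exact ih m (by omega) found hmem

lemma pvAStruct_run (n : Nat) (v : String) (rest found : List String)
    (hhd : ∀ x, rest.head? = some x → x ≠ v) :
    pvAStruct (List.replicate n v ++ rest) found =
      if 3 ≤ n then pvAStruct rest (if found.contains v then found else found ++ [v])
      else pvAStruct rest found := by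
  match n with
  | 0 => simp
  | 1 => simpa using pvAStruct_run_one v rest found hhd
  | 2 => simpa [List.replicate_succ] using pvAStruct_run_two v rest found hhd
  | (m+3) =>
    have hstep : pvAStruct (List.replicate (m+3) v ++ rest) found
        = pvAStruct (List.replicate m v ++ rest)
            (if found.contains v then found else found ++ [v]) := by
      simp [List.replicate_succ, pvAStruct]
    have hmem : (if found.contains v then found else found ++ [v]).contains v = true := by
      split <;> simp_all
    rw [hstep, pvAStruct_run_mem m v rest _ hmem hhd]
    simp

lemma pvAStruct_eq_bFound : ∀ (l found : List String), pvAStruct l found = sssjgBFound l found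
  | [], found => by simp [pvAStruct, sssjgBFound]
  | v :: r, found => by
    have hle := pvPrefLen_le v r
    have hsplit : v :: r = List.replicate (1 + pvPrefLen v r) v ++ r.drop (pvPrefLen v r) := by
      rw [show 1 + pvPrefLen v r = pvPrefLen v r + 1 from Nat.add_comm _ _,
          List.replicate_succ]
      simp only [List.cons_append, List.cons.injEq, true_and]
      conv_lhs => rw [← List.take_append_drop (pvPrefLen v r) r]
      rw [pvPrefLen_take]
    have hhd : ∀ x, (r.drop (pvPrefLen v r)).head? = some x → x ≠ v := by
      intro x hx
      rw [List.head?_drop] at hx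
      exact pvPrefLen_head v r x hx
    have hrec := pvAStruct_eq_bFound (r.drop (pvPrefLen v r))
    have hB : sssjgBFound (v :: r) found =
        sssjgBFound (r.drop (pvPrefLen v r))
          (if 3 ≤ 1 + pvPrefLen v r && !found.contains v then found ++ [v] else found) := by
      rw [sssjgBFound]
      simp
    rw [hB]
    conv_lhs => rw [hsplit]
    rw [pvAStruct_run _ v _ found hhd]
    by_cases h3 : 3 ≤ 1 + pvPrefLen v r
    · rw [if_pos h3, hrec]
      by_cases hc : found.contains v
      · simp [h3]
      · simp [h3]
    · rw [if_neg h3, hrec]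
      simp [h3]
termination_by l _ => l.length
decreasing_by simp [List.length_drop]

lemma found_eq (tiles : List String) : sssjgAFound tiles 0 2 [] = sssjgBFound tiles [] := by
  have := sssjgAFound_eq_struct tiles 0 []
  simpa [pvAStruct_eq_bFound] using this

lemma bScan_cons (a b c : Char) (r : List Char) :
    sssjgBScan (a :: b :: c :: r) =
      ((pvDigit a + 1 == pvDigit b && pvDigit b + 1 == pvDigit c) || sssjgBScan (b :: c :: r)) := by
  simp [sssjgBScan]

lemma bScan_short (cs : List Char) (h : cs.length < 3) : sssjgBScan cs = false := by
  match cs with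
  | [] => rfl
  | [_] => rfl
  | [_, _] => rfl
  | _ :: _ :: _ :: _ => simp at h; omega

lemma scan_eq_aux (cs : List Char) (i : Nat) :
    sssjgAScan cs (i : Int) = sssjgBScan (cs.drop i) := by
  have H : ∀ (m i : Nat), cs.length - i ≤ m →
      sssjgAScan cs (i : Int) = sssjgBScan (cs.drop i) := by
    intro m
    induction m with
    | zero =>
      intro i hm
      rw [sssjgAScan, dif_neg (by push_cast; omega)]
      rw [bScan_short _ (by simp; omega)]
    | succ m ih =>
      intro i hm
      by_cases h : i + 2 < cs.length
      · have hlen : 3 ≤ (cs.drop i).length := by simp; omega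
        obtain ⟨a, t1, hd1⟩ : ∃ a t1, cs.drop i = a :: t1 := by
          cases hdk : cs.drop i with
          | nil => simp [hdk] at hlen
          | cons a t1 => exact ⟨a, t1, rfl⟩
        obtain ⟨b, t2, hd2⟩ : ∃ b t2, t1 = b :: t2 := by
          cases t1 with
          | nil => rw [hd1] at hlen; simp at hlen
          | cons b t2 => exact ⟨b, t2, rfl⟩
        obtain ⟨c, t3, hd3⟩ : ∃ c t3, t2 = c :: t3 := by
          cases t2 with
          | nil => rw [hd1, hd2] at hlen; simp at hlen
          | cons c t3 => exact ⟨c, t3, rfl⟩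
        subst hd2; subst hd3
        have hdrop1 : cs.drop (i + 1) = b :: c :: t3 := by
          rw [← List.tail_drop, hd1]; rfl
        have hg0 : (PySem.List.pyGet? cs (i : Int)).getD ' ' = a := by
          rw [PySem.List.pyGet?_natCast]
          have : cs[i]? = (cs.drop i)[0]? := by simp [List.getElem?_drop]
          rw [this, hd1]; rfl
        have hg1 : (PySem.List.pyGet? cs ((i : Int) + 1)).getD ' ' = b := by
          rw [show (i : Int) + 1 = ((i + 1 : Nat) : Int) by push_cast; ring,
              PySem.List.pyGet?_natCast]
          have : cs[i + 1]? = (cs.drop i)[1]? := by simp [List.getElem?_drop]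
          rw [this, hd1]; rfl
        have hg2 : (PySem.List.pyGet? cs ((i : Int) + 2)).getD ' ' = c := by
          rw [show (i : Int) + 2 = ((i + 2 : Nat) : Int) by push_cast; ring,
              PySem.List.pyGet?_natCast]
          have : cs[i + 2]? = (cs.drop i)[2]? := by simp [List.getElem?_drop]
          rw [this, hd1]; rfl
        rw [sssjgAScan, dif_pos (by push_cast; omega)]
        rw [if_neg (by push_cast; omega)]
        rw [hg0, hg1, hg2, hd1, bScan_cons]
        by_cases hc : (pvDigit a + 1 == pvDigit b && pvDigit b + 1 == pvDigit c) = true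
        · simp [hc]
        · simp only [hc, if_false, Bool.false_eq_true, Bool.false_or]
          rw [show (i : Int) + 1 = ((i + 1 : Nat) : Int) by push_cast; ring,
              ih (i + 1) (by omega), hdrop1]
      · rw [sssjgAScan]
        by_cases h1 : (i : Int) < (cs.length : Int) - 1
        · rw [dif_pos h1, if_pos (by push_cast at h1 ⊢; omega)]
          rw [bScan_short _ (by simp; omega)]
        · rw [dif_neg h1, bScan_short _ (by simp; push_cast at h1; omega)]
  exact H cs.length i (by omega)

lemma scan_eq (cs : List Char) : sssjgAScan cs 0 = sssjgBScan cs := by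
  have := scan_eq_aux cs 0
  simpa using this

-- ===== VERDICT (by name: the statement is the Claim_ definition above) =====
theorem san_se_san_jie_gao_spec : Claim_equal_san_se_san_jie_gao := by
  intro ms _ _
  unfold Spec_san_se_san_jie_gao san_se_san_jie_gao san_se_san_jie_gao_alt
  simp only [found_eq, scan_eq]
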